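-- pv_equiv track=rewrite | github.com/backyardbiomech/pyExamScan_v2 | init_functions.py | makeAreaDict
-- ===== SOURCE A (Python) =====
-- def makeAreaDict(quests):
--     '''
--     define dictionary containing search area for all 150 questions, names, and ID numbers
--     keys that start with F are first names, N are last names,
--     ID are ID numbers, and Q are questions
--     3 first and 5 last name boxes
--     '''
--     nAreas = {}
--     idAreas = {}
--     qAreas = {}
--     # First names
--     NX=124
--     NY=268
--     nameWidth=676
--     namegap = 2
--     for i in range(1,4):
--         keyName = 'F' + str(i)
--         startX=NX
--         startY=NY+(i-1)*(26+ namegap)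
--         endX=startX+nameWidth
--         endY=startY+20
--         nAreas[keyName] = (startX,startY), (endX, endY)
--
--     # Last names
--     NX=124
--     NY=400
--     nameWidth=676
--     namegap = 2
--     for i in range(1,6):
--         keyName = 'N' + str(i)
--         startX=NX
--         startY=NY+(i-1)*(26+ namegap)
--         endX=startX+nameWidth
--         endY=startY+20
--         nAreas[keyName] = (startX,startY), (endX, endY)
--
--     # ID number boxes
--     IDX = 874
--     IDY = 273
--     IDheight = 260
--     IDgap = 2
--     for i in range (1, 9):
--         keyName = 'ID' + format(i,'02d')
--         startX=IDX+(i-1)*(28+IDgap)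
--         startY= IDY
--         endX=startX+28
--         endY= startY + IDheight
--         idAreas[keyName] = (startX,startY), (endX, endY)
--
--     # Questions
--     QX = 126
--     QY = 595
--     Qwidth = 160
--     Qgap = 2
--     for i in range(1, quests+1):
--         keyName = 'Q' + format(i, '03d')
--         if i < 16:
--             startY=QY+((28+Qgap) * (i - 1))
--         elif i < 31:
--             QY = 1046
--             startY=QY+((28+Qgap) * (i - 16))
--         elif i < 46:
--             QX = 338
--             QY = 595
--             startY=QY+((28+Qgap) * (i - 31))
--         elif i < 61:
--             QY = 1046
--             startY=QY+((28+Qgap) * (i - 46))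
--         elif i < 76:
--             QX = 550
--             QY = 595
--             startY=QY+((28+Qgap) * (i - 61))
--         elif i < 91:
--             QY = 1046
--             startY=QY+((28+Qgap) * (i - 76))
--         elif i < 106:
--             QX = 762
--             QY = 595
--             startY=QY+((28+Qgap) * (i - 91))
--         elif i < 121:
--             QY = 1046
--             startY=QY+((28+Qgap) * (i - 106))
--         elif i < 136:
--             QX = 976
--             QY = 595
--             startY=QY+((28+Qgap) * (i - 121))
--         else:
--             QY = 1046
--             startY=QY+((28+Qgap) * (i - 136))
--         endY=startY+26
--         qAreas[keyName] = (QX, startY), (QX + Qwidth, endY)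
--     return qAreas, idAreas, nAreas
-- ===== SOURCE B (Python) =====
-- def makeAreaDict(quests):
--     '''
--     Same area dictionaries as the original, but the question boxes come from
--     closed-form index arithmetic instead of the ten-branch if/elif ladder.
--     '''
--     nAreas = {}
--     for prefix, ny, count in (('F', 268, 3), ('N', 400, 5)):
--         for i in range(1, count + 1):
--             y = ny + 28 * (i - 1)
--             nAreas[prefix + str(i)] = ((124, y), (800, y + 20))
--
--     idAreas = {'ID%02d' % i: ((874 + 30 * (i - 1), 273), (902 + 30 * (i - 1), 533))
--                for i in range(1, 9)}
--
--     qAreas = {}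
--     for i in range(1, quests + 1):
--         block = min((i - 1) // 15, 9)       # 15 questions per column half; caps like the final else
--         within = i - 1 - 15 * block
--         col = block // 2
--         qx = 976 if col == 4 else 126 + 212 * col
--         qy = 595 if block % 2 == 0 else 1046
--         sy = qy + 30 * within
--         qAreas['Q%03d' % i] = ((qx, sy), (qx + 160, sy + 26))
--     return qAreas, idAreas, nAreas
-- ===== Notes on version B (the rewrite author's own statement) =====
-- stated objective: simpler
-- what changed: The ten-branch if/elif ladder with mutated QX/QY state in the Questions loop is replaced by closed-form block/column index arithmetic per question (block = min((i-1)//15, 9), column = block//2), and the two name loops are merged into one parameterised loop.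
import Mathlib
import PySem

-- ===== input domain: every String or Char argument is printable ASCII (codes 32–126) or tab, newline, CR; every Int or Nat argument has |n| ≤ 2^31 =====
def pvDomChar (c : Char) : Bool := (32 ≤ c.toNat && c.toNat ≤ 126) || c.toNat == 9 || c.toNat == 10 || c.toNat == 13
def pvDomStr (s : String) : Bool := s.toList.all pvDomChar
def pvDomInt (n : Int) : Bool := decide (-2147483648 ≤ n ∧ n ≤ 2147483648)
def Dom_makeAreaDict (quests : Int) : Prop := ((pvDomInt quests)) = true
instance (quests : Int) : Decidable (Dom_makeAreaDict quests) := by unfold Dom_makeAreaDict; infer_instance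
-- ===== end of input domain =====

-- B replaces A's ten-branch if/elif ladder (with mutated QX/QY state) by closed-form
-- index arithmetic per question; objective: simpler, same O(quests) cost.

-- ===== PORT A =====
-- Python's format(i, '0<w>d'): zero-pad to width w, sign in front (used for '02d' and '03d')
def fmt0 (w : Nat) (i : Int) : String :=
  if i < 0 then
    String.ofList ('-' :: (List.replicate (w - 1 - (PySem.Int.toChars (-i)).length) '0' ++ PySem.Int.toChars (-i)))
  else
    String.ofList (List.replicate (w - (PySem.Int.toChars i).length) '0' ++ PySem.Int.toChars i)

-- one iteration of A's Questions loop; state = (qAreas, QX, QY)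
def qStepA (st : PySem.Dict String ((Int × Int) × (Int × Int)) × Int × Int) (i : Int) :
    PySem.Dict String ((Int × Int) × (Int × Int)) × Int × Int :=
  let q := st.1
  let QX := st.2.1
  let QY := st.2.2
  let keyName := "Q" ++ fmt0 3 i
  if i < 16 then
    let startY := QY + (28 + 2) * (i - 1)
    let endY := startY + 26
    (q.insert keyName ((QX, startY), (QX + 160, endY)), QX, QY)
  else if i < 31 then
    let QY : Int := 1046
    let startY := QY + (28 + 2) * (i - 16)
    let endY := startY + 26
    (q.insert keyName ((QX, startY), (QX + 160, endY)), QX, QY)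
  else if i < 46 then
    let QX : Int := 338
    let QY : Int := 595
    let startY := QY + (28 + 2) * (i - 31)
    let endY := startY + 26
    (q.insert keyName ((QX, startY), (QX + 160, endY)), QX, QY)
  else if i < 61 then
    let QY : Int := 1046
    let startY := QY + (28 + 2) * (i - 46)
    let endY := startY + 26
    (q.insert keyName ((QX, startY), (QX + 160, endY)), QX, QY)
  else if i < 76 then
    let QX : Int := 550
    let QY : Int := 595
    let startY := QY + (28 + 2) * (i - 61)
    let endY := startY + 26
    (q.insert keyName ((QX, startY), (QX + 160, endY)), QX, QY)
  else if i < 91 then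
    let QY : Int := 1046
    let startY := QY + (28 + 2) * (i - 76)
    let endY := startY + 26
    (q.insert keyName ((QX, startY), (QX + 160, endY)), QX, QY)
  else if i < 106 then
    let QX : Int := 762
    let QY : Int := 595
    let startY := QY + (28 + 2) * (i - 91)
    let endY := startY + 26
    (q.insert keyName ((QX, startY), (QX + 160, endY)), QX, QY)
  else if i < 121 then
    let QY : Int := 1046
    let startY := QY + (28 + 2) * (i - 106)
    let endY := startY + 26
    (q.insert keyName ((QX, startY), (QX + 160, endY)), QX, QY)
  else if i < 136 then
    let QX : Int := 976
    let QY : Int := 595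
    let startY := QY + (28 + 2) * (i - 121)
    let endY := startY + 26
    (q.insert keyName ((QX, startY), (QX + 160, endY)), QX, QY)
  else
    let QY : Int := 1046
    let startY := QY + (28 + 2) * (i - 136)
    let endY := startY + 26
    (q.insert keyName ((QX, startY), (QX + 160, endY)), QX, QY)

def makeAreaDict (quests : Int) : (List (String × (Int × Int) × (Int × Int))) × (List (String × (Int × Int) × (Int × Int))) × (List (String × (Int × Int) × (Int × Int))) :=
  let nAreas : PySem.Dict String ((Int × Int) × (Int × Int)) := PySem.Dict.empty
  -- First names: NX=124, NY=268, nameWidth=676, namegap=2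
  let nAreas := (PySem.List.pyRange 1 4 1).foldl (fun d i =>
    let keyName := "F" ++ PySem.Int.toStr i
    let startX : Int := 124
    let startY : Int := 268 + (i - 1) * (26 + 2)
    let endX := startX + 676
    let endY := startY + 20
    d.insert keyName ((startX, startY), (endX, endY))) nAreas
  -- Last names: NY=400
  let nAreas := (PySem.List.pyRange 1 6 1).foldl (fun d i =>
    let keyName := "N" ++ PySem.Int.toStr i
    let startX : Int := 124
    let startY : Int := 400 + (i - 1) * (26 + 2)
    let endX := startX + 676
    let endY := startY + 20
    d.insert keyName ((startX, startY), (endX, endY))) nAreas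
  -- ID number boxes: IDX=874, IDY=273, IDheight=260, IDgap=2
  let idAreas := (PySem.List.pyRange 1 9 1).foldl (fun d i =>
    let keyName := "ID" ++ fmt0 2 i
    let startX : Int := 874 + (i - 1) * (28 + 2)
    let startY : Int := 273
    let endX := startX + 28
    let endY := startY + 260
    d.insert keyName ((startX, startY), (endX, endY))) (PySem.Dict.empty : PySem.Dict String ((Int × Int) × (Int × Int)))
  -- Questions: QX=126, QY=595, Qwidth=160, Qgap=2, mutable QX/QY threaded through qStepA
  let qFin := (PySem.List.pyRange 1 (quests + 1) 1).foldl qStepA (PySem.Dict.empty, 126, 595)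
  (qFin.1.items, idAreas.items, nAreas.items)

-- ===== PORT B =====
-- body of B's Questions loop: closed-form block/column arithmetic
def qBodyB (q : PySem.Dict String ((Int × Int) × (Int × Int))) (i : Int) :
    PySem.Dict String ((Int × Int) × (Int × Int)) :=
  let block := min (PySem.Int.floordiv (i - 1) 15) 9
  let within := i - 1 - 15 * block
  let col := PySem.Int.floordiv block 2
  let qx : Int := if col = 4 then 976 else 126 + 212 * col
  let qy : Int := if PySem.Int.mod block 2 = 0 then 595 else 1046
  let sy := qy + 30 * within
  q.insert ("Q" ++ fmt0 3 i) ((qx, sy), (qx + 160, sy + 26))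

def makeAreaDict_alt (quests : Int) : (List (String × (Int × Int) × (Int × Int))) × (List (String × (Int × Int) × (Int × Int))) × (List (String × (Int × Int) × (Int × Int))) :=
  let nAreas := ([("F", ((268 : Int), (3 : Int))), ("N", (400, 5))]).foldl (fun d t =>
    (PySem.List.pyRange 1 (t.2.2 + 1) 1).foldl (fun d i =>
      let y := t.2.1 + 28 * (i - 1)
      d.insert (t.1 ++ PySem.Int.toStr i) ((124, y), (800, y + 20))) d)
    (PySem.Dict.empty : PySem.Dict String ((Int × Int) × (Int × Int)))
  let idAreas := (PySem.List.pyRange 1 9 1).foldl (fun d i =>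
    d.insert ("ID" ++ fmt0 2 i) (((874 + 30 * (i - 1) : Int), (273 : Int)), ((902 + 30 * (i - 1) : Int), (533 : Int))))
    (PySem.Dict.empty : PySem.Dict String ((Int × Int) × (Int × Int)))
  let qAreas := (PySem.List.pyRange 1 (quests + 1) 1).foldl qBodyB PySem.Dict.empty
  (qAreas.items, idAreas.items, nAreas.items)

-- ===== PRECONDITION & SPEC =====
def Spec_makeAreaDict (quests : Int) (out : (List (String × (Int × Int) × (Int × Int))) × (List (String × (Int × Int) × (Int × Int))) × (List (String × (Int × Int) × (Int × Int)))) : Prop := out = makeAreaDict_alt quests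
instance (quests : Int) (out : (List (String × (Int × Int) × (Int × Int))) × (List (String × (Int × Int) × (Int × Int))) × (List (String × (Int × Int) × (Int × Int)))) : Decidable (Spec_makeAreaDict quests out) := by
  unfold Spec_makeAreaDict
  have h1 : DecidableEq (List (String × (Int × Int) × (Int × Int))) := by infer_instance
  exact @instDecidableEqProd _ _ h1 (@instDecidableEqProd _ _ h1 h1) out (makeAreaDict_alt quests)

-- ===== CLAIM (what is proved, stated in full; the proofs are below) =====
def Claim_equal_makeAreaDict : Prop := ∀ (quests : Int), Dom_makeAreaDict quests → Spec_makeAreaDict quests (makeAreaDict quests)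

-- ===== LEMMAS AND PROOFS =====

-- QX of A's loop state after processing question k (also 126 for k ≤ 0, the initial value)
def SX (k : Int) : Int :=
  if k < 31 then 126 else if k < 61 then 338 else if k < 91 then 550 else if k < 121 then 762 else 976

-- QY of A's loop state after processing question k (595 initially)
def SY (k : Int) : Int :=
  if k ≤ 0 then 595 else if (min ((k - 1) / 15) 9) % 2 = 0 then 595 else 1046

theorem stepAB (i : Int) (hi : 1 ≤ i) (d : PySem.Dict String ((Int × Int) × (Int × Int))) :
    qStepA (d, SX (i - 1), SY (i - 1)) i = (qBodyB d i, SX i, SY i) := by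
  have h15 : PySem.Int.floordiv (i - 1) 15 = (i - 1) / 15 :=
    PySem.Int.floordiv_eq_ediv_of_pos (by norm_num)
  have h2 : ∀ b : Int, PySem.Int.floordiv b 2 = b / 2 := fun b =>
    PySem.Int.floordiv_eq_ediv_of_pos (by norm_num)
  have hm : ∀ b : Int, PySem.Int.mod b 2 = b % 2 := fun b =>
    PySem.Int.mod_eq_emod_of_pos (by norm_num)
  unfold qStepA qBodyB
  dsimp only
  rw [h15, h2, hm]
  split_ifs <;>
    first
      | (exfalso; omega)
      | (simp only [Prod.mk.injEq, SX, SY]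
         refine ⟨?_, by split_ifs <;> omega, by split_ifs <;> omega⟩
         congr 1
         try rfl
         simp only [Prod.mk.injEq, true_and]
         omega)

theorem loopQ (n : Nat) (d : PySem.Dict String ((Int × Int) × (Int × Int))) :
    (PySem.List.pyRange 1 ((n : Int) + 1) 1).foldl qStepA (d, 126, 595) =
      ((PySem.List.pyRange 1 ((n : Int) + 1) 1).foldl qBodyB d, SX n, SY n) := by
  induction n with
  | zero =>
      rw [PySem.List.pyRange_one_eq_nil (by norm_num)]
      simp [SX, SY]
  | succ n ih =>
      have h : PySem.List.pyRange 1 ((↑(n + 1) : Int) + 1) 1 =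
          PySem.List.pyRange 1 ((n : Int) + 1) 1 ++ [(n : Int) + 1] := by
        push_cast
        exact PySem.List.pyRange_one_succ_right (by omega)
      rw [h, List.foldl_append, List.foldl_append, ih]
      have hs := stepAB ((n : Int) + 1) (by omega)
        ((PySem.List.pyRange 1 ((n : Int) + 1) 1).foldl qBodyB d)
      simp only [add_sub_cancel_right] at hs
      simpa using hs

-- ===== VERDICT (by name: the statement is the Claim_ definition above) =====
theorem makeAreaDict_spec : Claim_equal_makeAreaDict := by
  intro quests _
  show makeAreaDict quests = makeAreaDict_alt quests
  unfold makeAreaDict makeAreaDict_alt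
  simp only [Prod.mk.injEq]
  refine ⟨?_, by decide, by decide⟩
  by_cases hq : quests < 1
  · rw [PySem.List.pyRange_one_eq_nil (by omega)]
    rfl
  · have hq' : quests = ((quests.toNat : Int)) := by omega
    rw [hq']
    rw [loopQ quests.toNat PySem.Dict.empty]
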